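-- pv_equiv track=rewrite | github.com/xongeeuse/algorithminssafy | 2.study/Week08/[PGS]외톨이 알파벳.py | solution
-- ===== SOURCE A (Python) =====
-- def solution(input_string):
--     answer = ''
--
--     result = []
--     for char in input_string:
--         if not result:
--             result.append(char)
--             continue
--
--         if char == result[-1]:
--             continue
--         result.append(char)
--
--     result.sort()
--
--     for r in result:
--         if r not in answer and result.count(r) > 1:
--             answer += r
--
--     if not answer:
--         return 'N'
--
--     return answer
-- ===== SOURCE B (Python) =====
-- def solution(input_string):
--     # Per-letter 3-state automaton: a letter is "lonely" iff the pattern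
--     # (c, then a non-c, then c again) occurs as a subsequence, i.e. it has
--     # a second run.  No run-compression list, no counting, no rescans.
--     def multi_run(c):
--         state = 0  # 0: before first c, 1: inside/after first c, 2: after a gap
--         for ch in input_string:
--             if state == 0 and ch == c:
--                 state = 1
--             elif state == 1 and ch != c:
--                 state = 2
--             elif state == 2 and ch == c:
--                 return True
--         return False
--     ans = ''.join(c for c in sorted(set(input_string)) if multi_run(c))
--     return ans or 'N'
-- ===== Notes on version B (the rewrite author's own statement) =====
-- stated objective: faster
-- what changed: Instead of building the compressed-run list, sorting it and rescanning it with count/membership tests, B runs a 3-state automaton per distinct letter that detects the subsequence pattern (c, non-c, c) meaning a second run exists, emitting sorted distinct letters that match.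
import Mathlib
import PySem

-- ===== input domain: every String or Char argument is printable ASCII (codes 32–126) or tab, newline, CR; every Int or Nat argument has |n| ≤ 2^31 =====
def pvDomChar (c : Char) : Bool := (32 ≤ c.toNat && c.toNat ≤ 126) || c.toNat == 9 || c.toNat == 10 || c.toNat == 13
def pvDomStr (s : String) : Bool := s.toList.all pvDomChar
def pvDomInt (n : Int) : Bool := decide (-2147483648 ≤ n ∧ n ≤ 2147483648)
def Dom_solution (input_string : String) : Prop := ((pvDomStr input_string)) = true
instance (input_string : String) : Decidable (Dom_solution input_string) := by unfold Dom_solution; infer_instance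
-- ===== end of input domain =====

-- B replaces A's run-list build + full sort + quadratic count/membership rescans by a
-- per-distinct-letter 3-state automaton detecting the subsequence (c, non-c, c), i.e. a second run.

-- ===== PORT A =====
def solution (input_string : String) : String :=
  let result := input_string.toList.foldl
    (fun res char =>
      if res = [] then res ++ [char]
      else if res.getLast? = some char then res
      else res ++ [char]) []
  let result := PySem.List.sorted result (fun x => x) false
  let answer := result.foldl
    (fun ans r =>
      if ¬ ans.contains r ∧ result.count r > 1 then ans ++ [r] else ans) []
  if answer = [] then "N" else String.ofList answer

-- ===== PORT B =====
/-- Source B's inner `multi_run(c)`: 3-state scan; the early `return True` is the absorbing state 3. -/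
def multiRun (t : List Char) (c : Char) : Bool :=
  (t.foldl (fun (st : Nat) ch =>
    if st = 0 ∧ ch = c then 1
    else if st = 1 ∧ ch ≠ c then 2
    else if st = 2 ∧ ch = c then 3
    else st) 0) == 3

def solution_alt (input_string : String) : String :=
  let t := input_string.toList
  let ans := (PySem.List.sorted (PySem.Set.ofList t) (fun x => x) false).filter
      (fun c => multiRun t c)
  if ans = [] then "N" else String.ofList ans

-- ===== PRECONDITION & SPEC =====
def Spec_solution (input_string : String) (out : String) : Prop := out = solution_alt input_string
instance (input_string : String) (out : String) : Decidable (Spec_solution input_string out) := by unfold Spec_solution; infer_instance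

-- ===== CLAIM (what is proved, stated in full; the proofs are below) =====
def Claim_equal_solution : Prop := ∀ (input_string : String), Dom_solution input_string → Spec_solution input_string (solution input_string)

-- ===== LEMMAS AND PROOFS =====

/-- The compressed-run list of `l` after a run ending in `p` (none = no previous char). -/
def runsF : Option Char → List Char → List Char
  | _, [] => []
  | p, c :: l => if some c = p then runsF p l else c :: runsF (some c) l

/-- A's first loop builds exactly the compressed-run list. -/
theorem foldA_eq_runsF (l acc : List Char) :
    l.foldl (fun res char =>
      if res = [] then res ++ [char]
      else if res.getLast? = some char then res
      else res ++ [char]) acc = acc ++ runsF acc.getLast? l := by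
  induction l generalizing acc with
  | nil => simp [runsF]
  | cons c l ih =>
    rw [List.foldl_cons]
    by_cases hacc : acc = []
    · subst hacc
      rw [if_pos rfl, List.nil_append, ih]
      simp [runsF]
    · rcases h : acc.getLast? with _ | p
      · exact absurd (List.getLast?_eq_none_iff.mp h) hacc
      · by_cases hc : c = p
        · subst hc
          rw [if_neg hacc, if_pos rfl, ih, h]
          simp [runsF]
        · have hpc : ¬ (some p = some c) := fun e => hc (Option.some.inj e).symm
          rw [if_neg hacc, if_neg hpc, ih, List.getLast?_concat]
          simp [runsF, hc]

/-- Elements of the run list come from the list. -/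
theorem runsF_subset (p : Option Char) (l : List Char) (x : Char) (h : x ∈ runsF p l) : x ∈ l := by
  induction l generalizing p with
  | nil => simp [runsF] at h
  | cons c l ih =>
    rw [runsF] at h
    split at h
    · exact List.mem_cons_of_mem _ (ih _ h)
    · rcases List.mem_cons.mp h with rfl | h
      · exact List.mem_cons_self
      · exact List.mem_cons_of_mem _ (ih _ h)

/-- The count of c in the run list does not depend on a previous char that is not c. -/
theorem runsF_count_indep (c : Char) (l : List Char) (p q : Option Char)
    (hp : p ≠ some c) (hq : q ≠ some c) :
    (runsF p l).count c = (runsF q l).count c := by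
  cases l with
  | nil => rfl
  | cons x l =>
    rw [runsF, runsF]
    by_cases hx : x = c
    · subst hx
      rw [if_neg (fun e => hp e.symm), if_neg (fun e => hq e.symm)]
    · have key : ∀ p' : Option Char,
          (if some x = p' then runsF p' l else x :: runsF (some x) l).count c
            = (runsF (some x) l).count c := by
        intro p'
        split
        · next h => rw [← h]
        · rw [List.count_cons_of_ne hx]
      rw [key p, key q]

/-- Membership of c in the run list, when the previous char is not c. -/
theorem mem_runsF (c : Char) (l : List Char) (p : Option Char) (hp : p ≠ some c) :
    c ∈ runsF p l ↔ c ∈ l := by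
  induction l generalizing p with
  | nil => simp [runsF]
  | cons x l ih =>
    rw [runsF]
    by_cases hx : x = c
    · subst hx
      rw [if_neg (fun e => hp e.symm)]
      simp
    · split
      · next h =>
        rw [ih p hp]
        simp [Ne.symm hx]
      · simp only [List.mem_cons]
        rw [ih (some x) (fun e => hx (Option.some.inj e))]

/-- Source B's automaton step. -/
def mrStep (c : Char) (st : Nat) (ch : Char) : Nat :=
  if st = 0 ∧ ch = c then 1
  else if st = 1 ∧ ch ≠ c then 2
  else if st = 2 ∧ ch = c then 3
  else st

theorem mr_from3 (c : Char) (l : List Char) : l.foldl (mrStep c) 3 = 3 := by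
  induction l with
  | nil => rfl
  | cons x l ih => simpa [mrStep] using ih

theorem mr_from2 (c : Char) (l : List Char) : l.foldl (mrStep c) 2 = 3 ↔ c ∈ l := by
  induction l with
  | nil => simp
  | cons x l ih =>
    by_cases hx : x = c
    · subst hx
      simp [mrStep, mr_from3]
    · rw [List.foldl_cons]
      have : mrStep c 2 x = 2 := by simp [mrStep, hx]
      rw [this, ih]
      simp [Ne.symm hx]

theorem mr_from1 (c : Char) (l : List Char) :
    l.foldl (mrStep c) 1 = 3 ↔ 1 ≤ (runsF (some c) l).count c := by
  induction l with
  | nil => simp [runsF]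
  | cons x l ih =>
    by_cases hx : x = c
    · subst hx
      have : mrStep x 1 x = 1 := by simp [mrStep]
      rw [List.foldl_cons, this, ih, runsF, if_pos rfl]
    · have hst : mrStep c 1 x = 2 := by simp [mrStep, hx]
      have hr : runsF (some c) (x :: l) = x :: runsF (some x) l := by
        rw [runsF, if_neg (fun e => hx (Option.some.inj e))]
      rw [List.foldl_cons, hst, mr_from2, hr, List.count_cons_of_ne hx]
      have hmem : c ∈ runsF (some x) l ↔ c ∈ l :=
        mem_runsF c l (some x) (fun e => hx (Option.some.inj e))
      constructor
      · intro h
        have := List.count_pos_iff.mpr (hmem.mpr h)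
        omega
      · intro h
        exact hmem.mp (List.count_pos_iff.mp (by omega))

theorem mr_from0 (c : Char) (l : List Char) :
    l.foldl (mrStep c) 0 = 3 ↔ 2 ≤ (runsF none l).count c := by
  induction l with
  | nil => simp [runsF]
  | cons x l ih =>
    by_cases hx : x = c
    · subst hx
      have hst : mrStep x 0 x = 1 := by simp [mrStep]
      have hr : runsF none (x :: l) = x :: runsF (some x) l := by
        rw [runsF, if_neg (by simp)]
      rw [List.foldl_cons, hst, mr_from1, hr, List.count_cons_self]
      omega
    · have hst : mrStep c 0 x = 0 := by simp [mrStep, hx]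
      have hr : runsF none (x :: l) = x :: runsF (some x) l := by
        rw [runsF, if_neg (by simp)]
      rw [List.foldl_cons, hst, ih, hr, List.count_cons_of_ne hx,
        runsF_count_indep c l (some x) none (fun e => hx (Option.some.inj e)) (by simp)]

/-- Membership in A's dedup-filter loop. -/
theorem foldDF_mem (P : Char → Prop) [DecidablePred P] (l : List Char) (acc : List Char) (x : Char) :
    (x ∈ l.foldl (fun ans r => if ¬ ans.contains r ∧ P r then ans ++ [r] else ans) acc)
    ↔ x ∈ acc ∨ (x ∈ l ∧ P x) := by
  induction l generalizing acc with
  | nil => simp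
  | cons c l ih =>
    rw [List.foldl_cons]
    by_cases h : ¬ acc.contains c ∧ P c
    · rw [if_pos h, ih]
      constructor
      · rintro (hx | ⟨hx, hp⟩)
        · rcases List.mem_append.mp hx with hx | hx
          · exact Or.inl hx
          · rw [List.mem_singleton] at hx
            subst hx
            exact Or.inr ⟨List.mem_cons_self, h.2⟩
        · exact Or.inr ⟨List.mem_cons_of_mem _ hx, hp⟩
      · rintro (hx | ⟨hx, hp⟩)
        · exact Or.inl (List.mem_append_left _ hx)
        · rcases List.mem_cons.mp hx with rfl | hx
          · exact Or.inl (List.mem_append_right _ (List.mem_singleton_self _))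
          · exact Or.inr ⟨hx, hp⟩
    · rw [if_neg h, ih]
      constructor
      · rintro (hx | ⟨hx, hp⟩)
        · exact Or.inl hx
        · exact Or.inr ⟨List.mem_cons_of_mem _ hx, hp⟩
      · rintro (hx | ⟨hx, hp⟩)
        · exact Or.inl hx
        · rcases List.mem_cons.mp hx with rfl | hx
          · left
            by_contra hmem
            exact h ⟨by simpa using hmem, hp⟩
          · exact Or.inr ⟨hx, hp⟩

/-- A's dedup-filter loop appends a sublist of the traversed list. -/
theorem foldDF_sublist (P : Char → Prop) [DecidablePred P] (l : List Char) (acc : List Char) :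
    ∃ l', l'.Sublist l ∧
      l.foldl (fun ans r => if ¬ ans.contains r ∧ P r then ans ++ [r] else ans) acc = acc ++ l' := by
  induction l generalizing acc with
  | nil => exact ⟨[], List.Sublist.refl _, by simp⟩
  | cons c l ih =>
    rw [List.foldl_cons]
    by_cases h : ¬ acc.contains c ∧ P c
    · rw [if_pos h]
      obtain ⟨l', hs, he⟩ := ih (acc ++ [c])
      refine ⟨c :: l', List.Sublist.cons₂ _ hs, ?_⟩
      rw [he, List.append_assoc, List.singleton_append]
    · rw [if_neg h]
      obtain ⟨l', hs, he⟩ := ih acc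
      exact ⟨l', List.Sublist.cons _ hs, he⟩

/-- A's dedup-filter loop produces no duplicates. -/
theorem foldDF_nodup (P : Char → Prop) [DecidablePred P] (l : List Char) (acc : List Char)
    (h : acc.Nodup) :
    (l.foldl (fun ans r => if ¬ ans.contains r ∧ P r then ans ++ [r] else ans) acc).Nodup := by
  induction l generalizing acc with
  | nil => simpa
  | cons c l ih =>
    rw [List.foldl_cons]
    by_cases hc : ¬ acc.contains c ∧ P c
    · rw [if_pos hc]
      have hcm : c ∉ acc := by simpa using hc.1
      refine ih _ (List.Nodup.append h (List.nodup_singleton c) ?_)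
      intro a ha hb
      rw [List.mem_singleton] at hb
      subst hb
      exact hcm ha
    · rw [if_neg hc]
      exact ih _ h

theorem solution_eq_alt (s : String) : solution s = solution_alt s := by
  unfold solution solution_alt
  set t := s.toList with ht
  set r := runsF none t with hr
  have hA1 : t.foldl (fun res char =>
      if res = [] then res ++ [char]
      else if res.getLast? = some char then res
      else res ++ [char]) [] = r := by
    rw [foldA_eq_runsF]; simp [hr]
  simp only [hA1]
  set r' := PySem.List.sorted r (fun x => x) false with hr'
  set answer := r'.foldl
    (fun ans c => if ¬ ans.contains c ∧ r'.count c > 1 then ans ++ [c] else ans) [] with hans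
  have hcount : ∀ c : Char, r'.count c = r.count c := fun c =>
    (PySem.List.sorted_perm r (fun y => y) false).count_eq c
  set Bl := (PySem.List.sorted (PySem.Set.ofList t) (fun x => x) false).filter
      (fun c => multiRun t c) with hBl
  -- membership of A's answer: exactly the chars with ≥ 2 runs
  have hamem : ∀ x : Char, x ∈ answer ↔ 2 ≤ r.count x := by
    intro x
    rw [hans, foldDF_mem]
    simp only [List.not_mem_nil, false_or]
    constructor
    · rintro ⟨_, hp⟩
      rw [hcount x] at hp
      omega
    · intro hp
      have hxr : x ∈ r := List.count_pos_iff.mp (by omega)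
      exact ⟨(PySem.List.mem_sorted r (fun y => y) false x).mpr hxr, by rw [hcount x]; omega⟩
  -- membership of B's list: same characterization via the automaton
  have hbmem : ∀ x : Char, x ∈ Bl ↔ 2 ≤ r.count x := by
    intro x
    rw [hBl, List.mem_filter]
    rw [PySem.List.mem_sorted, PySem.Set.mem_ofList]
    unfold multiRun
    constructor
    · rintro ⟨_, hm⟩
      have := (mr_from0 x t).mp (by simpa using hm)
      rw [← hr] at this
      exact this
    · intro hcnt
      have hxr : x ∈ r := List.count_pos_iff.mp (by omega)
      refine ⟨runsF_subset _ _ _ (hr ▸ hxr), ?_⟩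
      simpa using (mr_from0 x t).mpr (hr ▸ hcnt)
  have hanodup : answer.Nodup := foldDF_nodup _ r' [] List.nodup_nil
  have hapw : answer.Pairwise (· < ·) := by
    obtain ⟨l', hsub, he⟩ := foldDF_sublist (fun c => r'.count c > 1) r' []
    have he' : answer = l' := by rw [hans, he, List.nil_append]
    have hle : r'.Pairwise (fun a b => a ≤ b) := PySem.List.sorted_pairwise r (fun y => y)
    have hple : answer.Pairwise (fun a b => a ≤ b) := he' ▸ hle.sublist hsub
    have hne : answer.Pairwise (fun a b => a ≠ b) := hanodup
    exact (hple.and hne).imp fun h => lt_of_le_of_ne h.1 h.2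
  have hbpw : Bl.Pairwise (· < ·) := by
    rw [hBl]
    exact (PySem.List.sorted_ofList_pairwise_lt t).filter _
  have hbnodup : Bl.Nodup := hbpw.imp ne_of_lt
  have hperm : answer.Perm Bl := by
    rw [List.perm_ext_iff_of_nodup hanodup hbnodup]
    intro x
    rw [hamem, hbmem]
  have hkey : answer = Bl :=
    hperm.eq_of_pairwise (fun a b _ _ h1 h2 => absurd h2 (lt_asymm h1)) hapw hbpw
  rw [hkey]

-- ===== VERDICT (by name: the statement is the Claim_ definition above) =====
theorem solution_spec : Claim_equal_solution := by
  intro s _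
  unfold Spec_solution
  exact solution_eq_alt s
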